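-- pv_equiv track=rewrite | github.com/0lesya/Laboratory | OTIK_labs/lab_4/task_3.py | check_more_than
-- ===== SOURCE A (Python) =====
-- def check_more_than(message, counts, cha):
--     if counts > 7:
--         while counts > 7:
--             pr = 7
--             message = message + str(1)+str(pr) + cha
--             counts = counts - pr
--             if counts > 7:
--                 continue
--             if counts != 1:
--                 message = message + str(1)+str(counts) + cha
--             else:
--                 message = message + str(0) + str(counts) + cha
--         return message
--     else:
--         message = message + str(1) + str(counts) + cha
--         return message
-- ===== SOURCE B (Python) =====
-- def check_more_than(message, counts, cha):
--     if counts <= 7: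
--         return message + "1" + str(counts) + cha
--     k = (counts - 1) // 7
--     rem = counts - 7 * k
--     tail = ("1" + str(rem) if rem != 1 else "0" + str(rem)) + cha
--     return message + ("17" + cha) * k + tail
-- ===== Notes on version B (the rewrite author's own statement) =====
-- stated objective: simpler
-- what changed: Replaced A's while-loop that subtracts 7 per iteration by a closed-form block count k = (counts-1)//7 and remainder, building the repeated '17'+cha segment by string multiplication.
import Mathlib
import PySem

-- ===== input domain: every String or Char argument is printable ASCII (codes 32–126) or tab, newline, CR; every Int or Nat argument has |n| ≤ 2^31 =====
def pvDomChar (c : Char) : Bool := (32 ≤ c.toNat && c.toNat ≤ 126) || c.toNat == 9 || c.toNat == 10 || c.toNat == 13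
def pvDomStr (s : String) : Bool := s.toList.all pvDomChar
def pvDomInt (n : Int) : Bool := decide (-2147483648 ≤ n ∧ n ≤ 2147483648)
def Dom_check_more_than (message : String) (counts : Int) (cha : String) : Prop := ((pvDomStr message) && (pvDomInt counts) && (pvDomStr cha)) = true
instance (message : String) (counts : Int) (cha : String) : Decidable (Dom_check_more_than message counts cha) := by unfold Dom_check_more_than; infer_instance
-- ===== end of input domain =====

-- B replaces A's subtract-7 while-loop by a closed-form block count (objective: simpler, no iteration).

-- ===== PORT A =====
-- the while-loop of A: enter only with counts > 7; 'continue' = recurse, otherwise append the tail block and fall out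
def check_more_than_loop (message : String) (counts : Int) (cha : String) : String :=
  if 7 < counts then
    let pr : Int := 7
    let message := message ++ PySem.Int.toStr 1 ++ PySem.Int.toStr pr ++ cha
    let counts := counts - pr
    if 7 < counts then
      check_more_than_loop message counts cha
    else if counts ≠ 1 then
      message ++ PySem.Int.toStr 1 ++ PySem.Int.toStr counts ++ cha
    else
      message ++ PySem.Int.toStr 0 ++ PySem.Int.toStr counts ++ cha
  else message
termination_by counts.toNat
decreasing_by omega

def check_more_than (message : String) (counts : Int) (cha : String) : String :=
  if 7 < counts then
    check_more_than_loop message counts cha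
  else
    message ++ PySem.Int.toStr 1 ++ PySem.Int.toStr counts ++ cha

-- ===== PORT B =====
-- Python's  s * k  for a string s and int k (empty for k ≤ 0)
def strRepeat (s : String) : Nat → String
  | 0 => ""
  | n + 1 => s ++ strRepeat s n

def check_more_than_alt (message : String) (counts : Int) (cha : String) : String :=
  if counts ≤ 7 then
    message ++ "1" ++ PySem.Int.toStr counts ++ cha
  else
    let k := PySem.Int.floordiv (counts - 1) 7
    let rem := counts - 7 * k
    let tail := (if rem ≠ 1 then "1" ++ PySem.Int.toStr rem else "0" ++ PySem.Int.toStr rem) ++ cha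
    message ++ strRepeat ("17" ++ cha) k.toNat ++ tail

-- ===== PRECONDITION & SPEC =====
def Spec_check_more_than (message : String) (counts : Int) (cha : String) (out : String) : Prop := out = check_more_than_alt message counts cha
instance (message : String) (counts : Int) (cha : String) (out : String) : Decidable (Spec_check_more_than message counts cha out) := by unfold Spec_check_more_than; infer_instance

-- ===== CLAIM (what is proved, stated in full; the proofs are below) =====
def Claim_equal_check_more_than : Prop := ∀ (message : String) (counts : Int) (cha : String), Dom_check_more_than message counts cha → Spec_check_more_than message counts cha (check_more_than message counts cha)

-- ===== LEMMAS AND PROOFS =====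

theorem loop_closed_form : ∀ (n : Nat) (message : String) (counts : Int) (cha : String),
    counts.toNat ≤ n → 7 < counts →
    check_more_than_loop message counts cha =
      message ++ strRepeat ("17" ++ cha) (PySem.Int.floordiv (counts - 1) 7).toNat ++
        ((if counts - 7 * PySem.Int.floordiv (counts - 1) 7 ≠ 1 then
            "1" ++ PySem.Int.toStr (counts - 7 * PySem.Int.floordiv (counts - 1) 7)
          else
            "0" ++ PySem.Int.toStr (counts - 7 * PySem.Int.floordiv (counts - 1) 7)) ++ cha) := by
  intro n
  induction n with
  | zero => intro m c cha hle hc; omega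
  | succ n ih =>
    intro m c cha hle hc
    have hfd : PySem.Int.floordiv (c - 1) 7 = (c - 1) / 7 :=
      PySem.Int.floordiv_eq_ediv_of_pos (by norm_num)
    have h1 : PySem.Int.toStr (1 : Int) = "1" := by decide
    have h7 : PySem.Int.toStr (7 : Int) = "7" := by decide
    rw [check_more_than_loop]
    simp only [if_pos hc]
    by_cases h2 : 7 < c - 7
    · have hfd' : PySem.Int.floordiv (c - 7 - 1) 7 = (c - 7 - 1) / 7 :=
        PySem.Int.floordiv_eq_ediv_of_pos (by norm_num)
      rw [if_pos h2, ih _ _ _ (by omega) h2]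
      have ek : (c - 1) / 7 = (c - 7 - 1) / 7 + 1 := by omega
      have hpos : 0 ≤ (c - 7 - 1) / 7 := by omega
      have etn : ((c - 1) / 7).toNat = ((c - 7 - 1) / 7).toNat + 1 := by omega
      have erem : c - 7 - 7 * ((c - 7 - 1) / 7) = c - 7 * ((c - 1) / 7) := by omega
      rw [hfd, hfd', erem, etn]
      simp [strRepeat, h1, h7, String.append_assoc]
    · rw [if_neg h2]
      have ek : (c - 1) / 7 = 1 := by omega
      rw [hfd, ek]
      have erem : c - 7 * 1 = c - 7 := by ring
      rw [erem]
      have h0 : PySem.Int.toStr (0 : Int) = "0" := by decide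
      by_cases h3 : c - 7 = 1
      · simp [h3, strRepeat, h1, h7, h0, String.append_assoc]
      · simp [h3, strRepeat, h1, h7, String.append_assoc]

theorem check_more_than_spec : Claim_equal_check_more_than := by
  intro message counts cha _
  unfold Spec_check_more_than check_more_than check_more_than_alt
  by_cases h : 7 < counts
  · rw [if_pos h, if_neg (by omega), loop_closed_form counts.toNat message counts cha le_rfl h]
  · rw [if_neg h, if_pos (by omega)]
    have h1 : PySem.Int.toStr (1 : Int) = "1" := by decide
    simp [h1]
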